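-- pv_equiv track=rewrite | github.com/huy2222/FillBlockGame_Group5 | FillBlock/Backtracking.py | constraint
-- ===== SOURCE A (Python) =====
-- def constraint(path, x, y):
--     """Kiểm tra xem ô (x, y) có hợp lệ để thêm vào đường đi không"""
--     dx = [0, 1, 0, -1]
--     dy = [-1, 0, 1, 0]
--
--     # Nếu ô đã đi qua thì không hợp lệ
--     if (x, y) in path:
--         return False
--
--     # Nếu là ô đầu tiên thì luôn hợp lệ
--     if not path:
--         return True
--
--     # ô mới phải kề với ô cuối cùng trong path
--     last_x, last_y = path[-1]
--     for i in range(4):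
--         if (last_x + dx[i], last_y + dy[i]) == (x, y):
--             return True
--
--     return False
-- ===== SOURCE B (Python) =====
-- def constraint(path, x, y):
--     # One recursive pass over the path with a 'previous cell' accumulator:
--     # rejects (x, y) the moment it is found in the path, and when the list is
--     # exhausted judges adjacency against the carried last cell (or accepts if
--     # the path was empty). No membership test, no indexing, no offset loop.
--     def go(cells, prev):
--         if not cells:
--             return prev is None or abs(x - prev[0]) + abs(y - prev[1]) == 1
--         if cells[0] == (x, y):
--             return False
--         return go(cells[1:], cells[0])
--     return go(path, None)
-- ===== Notes on version B (the rewrite author's own statement) =====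
-- stated objective: alternative
-- what changed: Single fused recursive pass with a previous-cell accumulator replaces A's three staged steps (membership test, emptiness test, indexed last cell with a dx/dy offset loop); adjacency becomes a closed-form Manhattan-distance test at the base case.
import Mathlib
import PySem

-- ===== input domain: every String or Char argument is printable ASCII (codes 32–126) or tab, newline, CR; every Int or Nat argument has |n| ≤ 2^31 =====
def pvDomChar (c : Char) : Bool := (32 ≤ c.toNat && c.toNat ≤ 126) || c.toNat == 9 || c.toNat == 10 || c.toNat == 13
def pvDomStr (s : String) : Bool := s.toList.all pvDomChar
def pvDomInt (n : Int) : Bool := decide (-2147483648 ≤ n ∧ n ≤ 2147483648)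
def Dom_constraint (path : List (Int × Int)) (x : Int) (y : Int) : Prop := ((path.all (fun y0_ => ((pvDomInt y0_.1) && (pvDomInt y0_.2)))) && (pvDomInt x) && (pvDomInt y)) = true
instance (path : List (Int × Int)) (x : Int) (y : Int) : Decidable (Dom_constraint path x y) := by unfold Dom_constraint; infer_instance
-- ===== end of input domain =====

-- B fuses A's three staged steps into one recursive pass carrying the previous cell; return values agree everywhere (objective: alternative).


-- ===== PORT A =====
def constraint (path : List (Int × Int)) (x : Int) (y : Int) : Bool :=
  let dx : List Int := [0, 1, 0, -1]
  let dy : List Int := [-1, 0, 1, 0]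
  if (x, y) ∈ path then false
  else if path = [] then true
  else
    match PySem.List.pyGet? path (-1) with
    | none => false  -- unreachable: path is nonempty here
    | some (last_x, last_y) =>
      (PySem.List.pyRange 0 4 1).any (fun i =>
        decide ((last_x + (PySem.List.pyGet? dx i).getD 0,
                 last_y + (PySem.List.pyGet? dy i).getD 0) = (x, y)))

-- ===== PORT B =====
-- the inner recursive helper 'go' of Source B
def constraintGo (x y : Int) : List (Int × Int) → Option (Int × Int) → Bool
  | [], none => true
  | [], some (a, b) => decide ((x - a).natAbs + (y - b).natAbs = 1)
  | c :: t, _ => if c = (x, y) then false else constraintGo x y t (some c)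

def constraint_alt (path : List (Int × Int)) (x : Int) (y : Int) : Bool :=
  constraintGo x y path none

-- ===== PRECONDITION & SPEC =====
def Spec_constraint (path : List (Int × Int)) (x : Int) (y : Int) (out : Bool) : Prop := out = constraint_alt path x y
instance (path : List (Int × Int)) (x : Int) (y : Int) (out : Bool) : Decidable (Spec_constraint path x y out) := by unfold Spec_constraint; infer_instance

-- ===== CLAIM (what is proved, stated in full; the proofs are below) =====
def Claim_equal_constraint : Prop := ∀ (path : List (Int × Int)) (x : Int) (y : Int), Dom_constraint path x y → Spec_constraint path x y (constraint path x y)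

-- ===== LEMMAS AND PROOFS =====
-- B's base-case adjacency judgment on the carried previous cell
def adjOk (x y : Int) : Option (Int × Int) → Bool
  | none => true
  | some (a, b) => decide ((x - a).natAbs + (y - b).natAbs = 1)

-- characterisation of the fused pass: membership short-circuit, then adjacency to last-or-prev
theorem constraintGo_eq (x y : Int) (cells : List (Int × Int)) :
    ∀ prev, constraintGo x y cells prev =
      if (x, y) ∈ cells then false else adjOk x y (cells.getLast?.or prev) := by
  induction cells with
  | nil => intro prev; rcases prev with _ | ⟨a, b⟩ <;> simp [constraintGo, adjOk]
  | cons c t ih =>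
    intro prev
    by_cases hc : c = (x, y)
    · simp [constraintGo, hc]
    · have hmem : ((x, y) ∈ c :: t) ↔ ((x, y) ∈ t) := by
        simp [List.mem_cons]; intro h; exact absurd h.symm hc
      rw [show constraintGo x y (c :: t) prev = constraintGo x y t (some c) by
            simp [constraintGo, hc],
          ih (some c)]
      rcases ht : t.getLast? with _ | l
      · have : t = [] := List.getLast?_eq_none_iff.mp ht
        subst this; simp [Ne.symm hc]
      · have hlast : (c :: t).getLast? = some l := by
          rcases t with _ | ⟨b, t'⟩
          · simp at ht
          · rw [List.getLast?_cons_cons]; exact ht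
        simp only [hlast, Option.or_some]
        by_cases hm : (x, y) ∈ t
        · simp [hm, hmem.mpr hm]
        · simp [hm, hmem]

theorem constraint_eq_alt (path : List (Int × Int)) (x : Int) (y : Int) :
    constraint path x y = constraint_alt path x y := by
  unfold constraint constraint_alt
  rw [constraintGo_eq]
  by_cases hm : (x, y) ∈ path
  · simp [hm]
  · simp only [hm, if_false]
    rcases h : path.getLast? with _ | ⟨lx, ly⟩
    · have : path = [] := List.getLast?_eq_none_iff.mp h
      simp [this, adjOk]
    · have hne : path ≠ [] := by intro he; rw [he] at h; simp at h
      have hget : PySem.List.pyGet? path (-1) = some (lx, ly) := by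
        simp only [PySem.List.pyGet?, PySem.List.pyIdx?]
        rcases path with _ | ⟨a, t⟩
        · simp at h
        · simp only [List.length_cons]
          rw [if_neg (by omega), if_pos (by omega)]
          norm_num
          have h2 : (a :: t)[t.length]? = some (lx, ly) := by
            simpa using ((List.getLast?_eq_getElem? (l := a :: t)).symm.trans h)
          simp only [List.getElem?_eq_getElem (by simp : t.length < (a :: t).length)] at h2
          exact Option.some.inj h2
      rw [if_neg hne, hget]
      have hr : PySem.List.pyRange 0 4 1 = [0, 1, 2, 3] := by decide
      rw [hr]
      simp only [List.any_cons, List.any_nil, adjOk]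
      norm_num [PySem.List.pyGet?, PySem.List.pyIdx?]
      rw [Bool.eq_iff_iff]
      simp only [Bool.or_eq_true, decide_eq_true_eq]
      simp only [show Int.toNat 2 = 2 from rfl, show Int.toNat 3 = 3 from rfl,
        List.getElem_cons_succ, List.getElem_cons_zero, Bool.and_eq_true, decide_eq_true_eq]
      omega

-- ===== VERDICT (by name: the statement is the Claim_ definition above) =====
theorem constraint_spec : Claim_equal_constraint := by
  intro path x y _
  unfold Spec_constraint
  exact constraint_eq_alt path x y
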